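-- pv_equiv track=rewrite | github.com/Sondinh2k3/tools_for_algo | mfd.py | find_mfd_setpoint
-- ===== SOURCE A (Python) =====
-- def find_mfd_setpoint(mfd_data):
--     """
--     Tìm điểm đặt từ dữ liệu MFD.
--     Điểm đặt là điểm có tích lũy nhỏ nhất ứng với lưu lượng lớn nhất.
--     """
--     if not mfd_data:
--         return None, None
--
--     # Tìm lưu lượng lớn nhất
--     max_flow = 0
--     for acc, flow in mfd_data:
--         if flow > max_flow:
--             max_flow = flow
--
--     # Tìm các điểm có lưu lượng lớn nhất
--     critical_points = []
--     for acc, flow in mfd_data: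
--         if flow == max_flow:
--             critical_points.append((acc, flow))
--
--     # Tìm điểm có tích lũy nhỏ nhất trong các điểm trên
--     if not critical_points:
--         return None, None
--
--     setpoint = min(critical_points, key=lambda point: point[0])
--     return setpoint
-- ===== SOURCE B (Python) =====
-- def find_mfd_setpoint(mfd_data):
--     if not mfd_data:
--         return None, None
--     max_flow = 0
--     best_acc = None
--     for acc, flow in mfd_data:
--         if flow > max_flow:
--             max_flow = flow
--             best_acc = acc
--         elif flow == max_flow:
--             if best_acc is None or acc < best_acc:
--                 best_acc = acc
--     if best_acc is None:
--         return None, None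
--     return best_acc, max_flow
-- ===== Notes on version B (the rewrite author's own statement) =====
-- stated objective: simpler
-- what changed: Replaced A's three passes (max-flow scan, filter of critical points, min-by-accumulation) with one single-pass loop maintaining the running max flow and the best (smallest, first) accumulation for it, with no intermediate list.
import Mathlib
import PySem

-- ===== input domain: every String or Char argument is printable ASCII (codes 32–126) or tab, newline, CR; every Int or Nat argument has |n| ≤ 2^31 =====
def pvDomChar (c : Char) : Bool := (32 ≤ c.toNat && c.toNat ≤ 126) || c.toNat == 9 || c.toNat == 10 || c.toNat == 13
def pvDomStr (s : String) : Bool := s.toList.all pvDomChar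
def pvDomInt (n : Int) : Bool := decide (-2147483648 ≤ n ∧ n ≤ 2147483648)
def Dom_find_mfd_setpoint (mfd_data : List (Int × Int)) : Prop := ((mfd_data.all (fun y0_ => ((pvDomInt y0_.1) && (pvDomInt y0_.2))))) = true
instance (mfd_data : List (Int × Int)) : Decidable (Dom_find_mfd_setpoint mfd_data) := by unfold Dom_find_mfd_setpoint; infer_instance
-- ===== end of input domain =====

-- B fuses A's three passes (max-flow scan, filter of critical points, min-by-accumulation)
-- into one loop; same return value, no intermediate list (objective: simpler, single pass).

-- ===== PORT A =====
-- loop 1 of A: running maximum flow, seeded with 0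
def pvMaxLoop (l : List (Int × Int)) (m : Int) : Int :=
  l.foldl (fun m p => if p.2 > m then p.2 else m) m

-- loop 2 of A: collect the points whose flow equals max_flow
def pvCritLoop (l : List (Int × Int)) (M : Int) : List (Int × Int) :=
  l.foldl (fun c p => if p.2 = M then c ++ [p] else c) []

def find_mfd_setpoint (mfd_data : List (Int × Int)) : Option Int × Option Int :=
  if mfd_data = [] then (none, none)
  else
    let max_flow := pvMaxLoop mfd_data 0
    let critical_points := pvCritLoop mfd_data max_flow
    if critical_points = [] then (none, none)
    else
      match PySem.List.min? critical_points (fun p => p.1) with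
      | some p => (some p.1, some p.2)
      | none => (none, none)   -- unreachable: critical_points ≠ []

-- ===== PORT B =====
-- B's single pass: state = (max_flow, best_acc)
def pvBLoop : List (Int × Int) → Int → Option Int → Int × Option Int
  | [], m, b => (m, b)
  | (a, f) :: t, m, b =>
    if f > m then pvBLoop t f (some a)
    else if f = m then
      pvBLoop t m (match b with
                   | none => some a
                   | some x => if a < x then some a else some x)
    else pvBLoop t m b

def find_mfd_setpoint_alt (mfd_data : List (Int × Int)) : Option Int × Option Int :=
  if mfd_data = [] then (none, none)
  else
    let r := pvBLoop mfd_data 0 none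
    match r.2 with
    | none => (none, none)
    | some a => (some a, some r.1)

-- ===== PRECONDITION & SPEC =====
def Spec_find_mfd_setpoint (mfd_data : List (Int × Int)) (out : Option Int × Option Int) : Prop := out = find_mfd_setpoint_alt mfd_data
instance (mfd_data : List (Int × Int)) (out : Option Int × Option Int) : Decidable (Spec_find_mfd_setpoint mfd_data out) := by unfold Spec_find_mfd_setpoint; infer_instance

-- ===== CLAIM (what is proved, stated in full; the proofs are below) =====
def Claim_equal_find_mfd_setpoint : Prop := ∀ (mfd_data : List (Int × Int)), Dom_find_mfd_setpoint mfd_data → Spec_find_mfd_setpoint mfd_data (find_mfd_setpoint mfd_data)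

-- ===== LEMMAS AND PROOFS =====

-- B's best_acc update step
def pvMStep (b : Option Int) (a : Int) : Option Int :=
  match b with
  | none => some a
  | some x => if a < x then some a else some x

-- accumulations of the points whose flow is M
def pvAccs (l : List (Int × Int)) (M : Int) : List Int :=
  (l.filter (fun p => p.2 = M)).map Prod.fst

theorem pvMStep_min (x a : Int) : pvMStep (some x) a = some (min x a) := by
  simp only [pvMStep, min_def]
  split_ifs <;> first | rfl | omega

theorem pvMFold_some (t : List Int) (x : Int) :
    t.foldl pvMStep (some x) = some (t.foldl min x) := by
  induction t generalizing x with
  | nil => rfl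
  | cons a t ih => simp [List.foldl_cons, pvMStep_min, ih]

theorem pvMaxLoop_le (l : List (Int × Int)) (m : Int) : m ≤ pvMaxLoop l m := by
  induction l generalizing m with
  | nil => simp [pvMaxLoop]
  | cons p t ih =>
    simp only [pvMaxLoop, List.foldl_cons] at *
    split_ifs with h
    · exact le_of_lt (lt_of_lt_of_le h (ih p.2))
    · exact ih m

theorem pvCritLoop_eq (l : List (Int × Int)) (M : Int) :
    pvCritLoop l M = l.filter (fun p => p.2 = M) := by
  suffices h : ∀ c, l.foldl (fun c p => if p.2 = M then c ++ [p] else c) c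
      = c ++ l.filter (fun p => p.2 = M) by
    simpa [pvCritLoop] using h []
  induction l with
  | nil => intro c; simp
  | cons p t ih =>
    intro c
    simp only [List.foldl_cons, List.filter_cons]
    by_cases h : p.2 = M
    · simp [h, ih]
    · simp [h, ih]

-- the single-pass invariant: pvBLoop computes the running max and the min
-- accumulation among points whose flow equals that max
theorem pvBLoop_char (l : List (Int × Int)) (m : Int) (b : Option Int) :
    pvBLoop l m b =
      (pvMaxLoop l m,
       if pvMaxLoop l m > m then (pvAccs l (pvMaxLoop l m)).foldl pvMStep none
       else (pvAccs l m).foldl pvMStep b) := by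
  induction l generalizing m b with
  | nil => simp [pvBLoop, pvMaxLoop, pvAccs]
  | cons p t ih =>
    obtain ⟨a, f⟩ := p
    have hmax : ∀ (m' : Int), pvMaxLoop ((a, f) :: t) m'
        = pvMaxLoop t (if f > m' then f else m') := by
      intro m'; simp [pvMaxLoop, List.foldl_cons]
    by_cases h1 : f > m
    · -- new strict max: best resets to a
      have hM : pvMaxLoop ((a, f) :: t) m = pvMaxLoop t f := by simp [hmax, h1]
      have hfM : f ≤ pvMaxLoop t f := pvMaxLoop_le t f
      have hgt : pvMaxLoop t f > m := by omega
      rw [show pvBLoop ((a, f) :: t) m b = pvBLoop t f (some a) by simp [pvBLoop, h1],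
          ih, hM, if_pos hgt]
      rcases lt_or_eq_of_le hfM with h2 | h2
      · have hne : ¬ (f = pvMaxLoop t f) := by omega
        rw [if_pos h2]
        simp [pvAccs, hne]
      · have hEq : pvMaxLoop t f = f := h2.symm
        rw [hEq, if_neg (lt_irrefl f)]
        simp only [pvAccs, List.filter_cons]
        simp [pvMStep]
    · by_cases h2 : f = m
      · -- flow ties the current max
        subst h2
        have hM : pvMaxLoop ((a, f) :: t) f = pvMaxLoop t f := by simp [hmax]
        rw [show pvBLoop ((a, f) :: t) f b = pvBLoop t f (pvMStep b a) by
              cases b <;> simp [pvBLoop, pvMStep], ih, hM]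
        by_cases h3 : pvMaxLoop t f > f
        · have hne : ¬ (f = pvMaxLoop t f) := by omega
          rw [if_pos h3, if_pos h3]
          simp [pvAccs, hne]
        · have hEq : pvMaxLoop t f = f := le_antisymm (by omega) (pvMaxLoop_le t f)
          rw [if_neg h3, if_neg h3]
          simp only [pvAccs, List.filter_cons, hEq]
          simp
      · -- flow below the current max: skipped
        have hM : pvMaxLoop ((a, f) :: t) m = pvMaxLoop t m := by simp [hmax, h1]
        have hmm : m ≤ pvMaxLoop t m := pvMaxLoop_le t m
        rw [show pvBLoop ((a, f) :: t) m b = pvBLoop t m b by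
              simp [pvBLoop, h1, h2], ih, hM]
        have hne : ¬ (f = pvMaxLoop t m) := by
          intro h; apply h1; omega
        simp [pvAccs, hne, h2]

theorem find_mfd_setpoint_eq (l : List (Int × Int)) :
    find_mfd_setpoint l = find_mfd_setpoint_alt l := by
  by_cases hnil : l = []
  · simp [find_mfd_setpoint, find_mfd_setpoint_alt, hnil]
  · simp only [find_mfd_setpoint, find_mfd_setpoint_alt, if_neg hnil]
    set M := pvMaxLoop l 0 with hMdef
    have hB : pvBLoop l 0 none = (M, (pvAccs l M).foldl pvMStep none) := by
      rw [pvBLoop_char]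
      by_cases h : M > 0
      · simp [← hMdef, h]
      · have h0 : M = 0 := le_antisymm (by omega) (pvMaxLoop_le l 0)
        simp [← hMdef, h0]
    rw [hB, pvCritLoop_eq]
    set crit := l.filter (fun p => p.2 = M) with hcrit
    rcases hc : crit with _ | ⟨q, rest⟩
    · simp [pvAccs, ← hcrit, hc]
    · -- crit nonempty: A takes min-by-acc; B's fold computed the min of the accs
      have hne : crit ≠ [] := by simp [hc]
      have haccs : pvAccs l M = q.1 :: rest.map Prod.fst := by
        simp [pvAccs, ← hcrit, hc]
      rw [haccs]
      simp only [List.foldl_cons, show pvMStep none q.1 = some q.1 from rfl, pvMFold_some]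
      have hne' : (q :: rest : List (Int × Int)) ≠ [] := by simp
      rw [if_neg hne']
      rcases hmin : PySem.List.min? (q :: rest) (fun p => p.1) with _ | p
      · exact absurd ((PySem.List.min?_eq_none_iff _ _).mp hmin) hne'
      · have hpmem0 : p ∈ q :: rest := PySem.List.min?_mem hmin
        have hpmem : p ∈ crit := by rw [hc]; exact hpmem0
        have hpmin : ∀ y ∈ q :: rest, p.1 ≤ y.1 := PySem.List.min?_isMin hmin
        have hp2 : p.2 = M := by
          rw [hcrit] at hpmem
          simpa using List.of_mem_filter hpmem
        have hfold := PySem.List.foldl_min_le (rest.map Prod.fst) q.1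
        have hfmem := PySem.List.foldl_min_mem (rest.map Prod.fst) q.1
        -- the fold-min is ≤ p.1 (p.1 is one of the accs)
        have hle1 : List.foldl min q.1 (rest.map Prod.fst) ≤ p.1 := by
          rcases List.mem_cons.mp hpmem0 with h | h
          · rw [h]; exact hfold.1
          · exact hfold.2 p.1 (List.mem_map.mpr ⟨p, h, rfl⟩)
        -- p.1 is ≤ the fold-min (the fold-min is one of the accs, p is min?)
        have hle2 : p.1 ≤ List.foldl min q.1 (rest.map Prod.fst) := by
          rcases hfmem with h | h
          · rw [h]; exact hpmin q List.mem_cons_self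
          · rcases List.mem_map.mp h with ⟨y, hy, hyeq⟩
            rw [← hyeq]
            exact hpmin y (List.mem_cons_of_mem _ hy)
        have heq : p.1 = List.foldl min q.1 (rest.map Prod.fst) := le_antisymm hle2 hle1
        simp [heq, hp2]

-- ===== VERDICT (by name: the statement is the Claim_ definition above) =====
theorem find_mfd_setpoint_spec : Claim_equal_find_mfd_setpoint := by
  intro l _
  unfold Spec_find_mfd_setpoint
  exact find_mfd_setpoint_eq l
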